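-- pv_equiv track=rewrite | github.com/KotisKotlyandii/lessons1 | ege22/85.py | f
-- ===== SOURCE A (Python) =====
-- def f(x):
--     b,i = 0,0
--     while x > 0:
--         if i % 2 > 0:
--             b += x % 10
--         x //= 10
--         i += 1
--     return i,b
-- ===== SOURCE B (Python) =====
-- def f(x):
--     # string-based: digit count and odd-position digit sum read off str(x)
--     if x <= 0:
--         return 0, 0
--     s = str(x)
--     return len(s), sum(int(c) for i, c in enumerate(reversed(s)) if i % 2 == 1)
-- ===== Notes on version B (the rewrite author's own statement) =====
-- stated objective: idiomatic
-- what changed: replaces the arithmetic accumulator loop of repeated modulus and floor division by building the decimal string once and summing int(c) over the odd indices of its reversal via enumerate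
import Mathlib
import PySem

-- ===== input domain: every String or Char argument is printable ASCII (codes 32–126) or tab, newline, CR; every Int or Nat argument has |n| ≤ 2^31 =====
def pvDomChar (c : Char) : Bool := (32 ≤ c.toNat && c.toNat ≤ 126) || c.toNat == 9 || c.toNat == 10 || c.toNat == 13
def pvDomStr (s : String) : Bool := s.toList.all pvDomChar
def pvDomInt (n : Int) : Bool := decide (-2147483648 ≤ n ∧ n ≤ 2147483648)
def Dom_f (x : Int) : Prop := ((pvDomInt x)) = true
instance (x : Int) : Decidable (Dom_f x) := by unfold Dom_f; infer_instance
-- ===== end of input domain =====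

-- B replaces A's arithmetic accumulator loop by the decimal string: digit count is its
-- length, and the odd-position digit sum is taken over the odd indices of its reversal.

-- ===== PORT A =====
def fGoA (x b i : Int) : Int × Int :=
  if 0 < x then
    fGoA (PySem.Int.floordiv x 10)
      (if 0 < PySem.Int.mod i 2 then b + PySem.Int.mod x 10 else b) (i + 1)
  else (i, b)
termination_by x.toNat
decreasing_by
  simp only [PySem.Int.floordiv, Int.fdiv_eq_ediv]
  omega

def f (x : Int) : Int × Int := fGoA x 0 0

-- ===== PORT B =====
-- int(c) for a single character; exact whenever c is a decimal digit (the only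
-- characters this port applies it to, since they come from str(x) with x > 0).
def pvCharInt (c : Char) : Int := (PySem.Int.ofChars? [c]).getD 0

def f_alt (x : Int) : Int × Int :=
  if x ≤ 0 then (0, 0)
  else   -- s = str(x)
    (((PySem.Int.toChars x).length : Int),
     (PySem.List.enumerate (PySem.Int.toChars x).reverse 0).foldl
       (fun acc p => if PySem.Int.mod p.1 2 == 1 then acc + pvCharInt p.2 else acc) 0)

-- ===== PRECONDITION & SPEC =====
def Spec_f (x : Int) (out : Int × Int) : Prop := out = f_alt x
instance (x : Int) (out : Int × Int) : Decidable (Spec_f x out) := by unfold Spec_f; infer_instance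

-- ===== CLAIM (what is proved, stated in full; the proofs are below) =====
def Claim_equal_f : Prop := ∀ (x : Int), Dom_f x → Spec_f x (f x)

-- ===== LEMMAS AND PROOFS =====

-- sum of entries at odd positions, positions counted from j
def pvS : List ℕ → ℕ → ℤ
  | [], _ => 0
  | d :: t, j => (if j % 2 = 1 then (d : ℤ) else 0) + pvS t (j + 1)

lemma pv_mod_two (j : ℕ) : PySem.Int.mod (j : ℤ) 2 = ((j % 2 : ℕ) : ℤ) := by
  simp only [PySem.Int.mod, Int.fmod_eq_emod]
  omega

lemma pv_goA (n : ℕ) : ∀ (x : Int), x.toNat = n → ∀ (b : ℤ) (j : ℕ),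
    fGoA x b (j : ℤ) =
      ((j : ℤ) + (Nat.digits 10 x.toNat).length, b + pvS (Nat.digits 10 x.toNat) j) := by
  induction n using Nat.strong_induction_on with
  | _ n ih =>
    intro x hx b j
    rw [fGoA]
    by_cases hpos : 0 < x
    · simp only [hpos, if_pos]
      have hx0 : 0 < x.toNat := by omega
      have hdig := Nat.digits_def' (by norm_num : (1:ℕ) < 10) hx0
      have hfd : PySem.Int.floordiv x 10 = x / 10 := by
        simp [PySem.Int.floordiv, Int.fdiv_eq_ediv]
      have hmd : PySem.Int.mod x 10 = ((x.toNat % 10 : ℕ) : ℤ) := by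
        simp [PySem.Int.mod, Int.fmod_eq_emod]
        omega
      have htn : (x / 10).toNat = x.toNat / 10 := by omega
      have hlt : (x / 10).toNat < n := by omega
      have : ((j : ℤ) + 1) = ((j + 1 : ℕ) : ℤ) := by push_cast; ring
      rw [this, hfd, ih _ hlt (x / 10) rfl _ (j + 1)]
      rw [htn, hdig, pv_mod_two]
      simp only [pvS, List.length_cons, Prod.mk.injEq]
      refine ⟨by push_cast; ring, ?_⟩
      rcases Nat.mod_two_eq_zero_or_one j with h | h
      · simp [h]
      · simp only [h, hmd]
        push_cast
        ring
    · simp only [hpos, if_false]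
      have : x.toNat = 0 := by omega
      simp [this, pvS]
-- characterisation of Nat.toDigitsCore via Nat.digits
lemma pv_toDigitsCore (fuel : ℕ) : ∀ (n : ℕ) (l : List Char), 0 < n → n ≤ fuel →
    Nat.toDigitsCore 10 fuel n l = ((Nat.digits 10 n).map Nat.digitChar).reverse ++ l := by
  induction fuel with
  | zero => intro n l h1 h2; omega
  | succ fuel ih =>
    intro n l h1 h2
    rw [Nat.toDigitsCore.eq_def]
    simp only
    have hdig := Nat.digits_def' (by norm_num : (1:ℕ) < 10) h1
    by_cases h : n / 10 = 0
    · simp only [h, if_pos]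
      rw [hdig, h, Nat.digits_zero]
      simp
    · simp only [h, if_false]
      have h1' : 0 < n / 10 := Nat.pos_of_ne_zero h
      have h2' : n / 10 ≤ fuel := by
        have := Nat.div_lt_self h1 (by norm_num : 1 < 10)
        omega
      rw [ih _ _ h1' h2', hdig]
      simp

lemma pv_toChars (x : Int) (hx : 0 < x) :
    PySem.Int.toChars x = ((Nat.digits 10 x.toNat).map Nat.digitChar).reverse := by
  have : ¬ x < 0 := by omega
  simp only [PySem.Int.toChars, this, if_false, Nat.toDigits]
  rw [pv_toDigitsCore (x.toNat + 1) x.toNat [] (by omega) (by omega)]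
  simp

lemma pv_charInt_digitChar (d : ℕ) (hd : d < 10) :
    pvCharInt (Nat.digitChar d) = (d : ℤ) := by
  interval_cases d <;> decide

lemma pv_fold (D : List ℕ) : ∀ (acc : ℤ) (j : ℕ), (∀ d ∈ D, d < 10) →
    (PySem.List.enumerate (D.map Nat.digitChar) (j : ℤ)).foldl
      (fun acc p => if PySem.Int.mod p.1 2 == 1 then acc + pvCharInt p.2 else acc) acc
      = acc + pvS D j := by
  induction D with
  | nil => intro acc j _; simp [PySem.List.enumerate_nil, pvS]
  | cons d t ih =>
    intro acc j hlt
    have hj1 : ((j : ℤ) + 1) = ((j + 1 : ℕ) : ℤ) := by push_cast; ring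
    simp only [List.map_cons, PySem.List.enumerate_cons, List.foldl_cons, hj1, pv_mod_two]
    rcases Nat.mod_two_eq_zero_or_one j with h | h
    · rw [if_neg (by simp [h] : ¬ ((((j % 2 : ℕ) : ℤ)) == 1) = true)]
      rw [ih acc (j + 1) (fun d hd => hlt d (List.mem_cons_of_mem _ hd))]
      simp [pvS, h]
    · rw [if_pos (by simp [h] : ((((j % 2 : ℕ) : ℤ)) == 1) = true)]
      rw [pv_charInt_digitChar d (hlt d List.mem_cons_self),
        ih _ (j + 1) (fun d hd => hlt d (List.mem_cons_of_mem _ hd))]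
      simp [pvS, h]
      ring

-- ===== VERDICT (by name: the statement is the Claim_ definition above) =====
theorem f_spec : Claim_equal_f := by
  intro x _
  unfold Spec_f f f_alt
  have hA : fGoA x 0 0 =
      (((Nat.digits 10 x.toNat).length : ℤ), pvS (Nat.digits 10 x.toNat) 0) := by
    simpa using pv_goA x.toNat x rfl 0 0
  rw [hA]
  by_cases hx : x ≤ 0
  · have h0 : x.toNat = 0 := by omega
    simp [hx, h0, pvS]
  · have hpos : 0 < x := by omega
    have hF : (PySem.List.enumerate ((Nat.digits 10 x.toNat).map Nat.digitChar) 0).foldl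
        (fun acc p => if PySem.Int.mod p.1 2 == 1 then acc + pvCharInt p.2 else acc) 0
        = pvS (Nat.digits 10 x.toNat) 0 := by
      simpa using pv_fold (Nat.digits 10 x.toNat) 0 0
        (fun d hd => Nat.digits_lt_base (by norm_num) hd)
    rw [if_neg hx, pv_toChars x hpos, List.reverse_reverse, hF]
    simp
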